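-- pv_equiv track=rewrite | github.com/ThomasStuart/pythonLessonJul6 | GeneratePasswords.py | ratePassword
-- ===== SOURCE A (Python) =====
-- def ratePassword(passwod):
--     score = 0
--
--     for i in range(0 , len( passwod) ) :
--         currentCharacter = passwod[i]
--         asciiDecValue    = ord(currentCharacter)
--
--         # range[97,122]
--         if   asciiDecValue >= 97 and asciiDecValue <= 122:
--             score = score + 1
--
--         # range[48,57]
--         elif asciiDecValue >= 48 and asciiDecValue <= 57 :
--             score = score + 2
--
--         else:
--             score = score + 3
--
--     return score
-- ===== SOURCE B (Python) =====
-- def ratePassword(passwod):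
--     n = len(passwod)
--     L = sum(1 for c in passwod if 97 <= ord(c) <= 122)
--     D = sum(1 for c in passwod if 48 <= ord(c) <= 57)
--     return 3 * n - 2 * L - D
-- ===== Notes on version B (the rewrite author's own statement) =====
-- stated objective: alternative
-- what changed: Replaces the per-character branching accumulator with two category counts and the closed form 3*n - 2*L - D (default 3, lowercase subtracts 2, digit subtracts 1).
import Mathlib
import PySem

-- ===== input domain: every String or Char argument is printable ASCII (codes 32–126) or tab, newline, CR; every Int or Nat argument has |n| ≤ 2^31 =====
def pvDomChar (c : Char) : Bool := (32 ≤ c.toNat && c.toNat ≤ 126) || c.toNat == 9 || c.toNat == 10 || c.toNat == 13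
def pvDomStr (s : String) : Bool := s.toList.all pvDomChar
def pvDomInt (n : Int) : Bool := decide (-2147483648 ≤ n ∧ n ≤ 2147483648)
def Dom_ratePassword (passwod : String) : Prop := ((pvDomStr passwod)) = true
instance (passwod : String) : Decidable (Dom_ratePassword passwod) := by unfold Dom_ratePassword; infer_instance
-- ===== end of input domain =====

-- B sums two category counts into the closed form 3*n - 2*L - D instead of A's per-character branching accumulator.

-- ===== PORT A =====
-- loop over positions with an accumulating score, branching on the character's code
def ratePassword (passwod : String) : Int :=
  passwod.toList.foldl
    (fun score c =>
      let asciiDecValue := c.toNat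
      if 97 ≤ asciiDecValue ∧ asciiDecValue ≤ 122 then score + 1
      else if 48 ≤ asciiDecValue ∧ asciiDecValue ≤ 57 then score + 2
      else score + 3) 0

-- ===== PORT B =====
def ratePassword_alt (passwod : String) : Int :=
  let l := passwod.toList
  let n : Int := l.length
  let L : Int := (l.filter (fun c => decide (97 ≤ c.toNat ∧ c.toNat ≤ 122))).length
  let D : Int := (l.filter (fun c => decide (48 ≤ c.toNat ∧ c.toNat ≤ 57))).length
  3 * n - 2 * L - D

-- ===== PRECONDITION & SPEC =====
def Spec_ratePassword (passwod : String) (out : Int) : Prop := out = ratePassword_alt passwod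
instance (passwod : String) (out : Int) : Decidable (Spec_ratePassword passwod out) := by unfold Spec_ratePassword; infer_instance

-- ===== CLAIM (what is proved, stated in full; the proofs are below) =====
def Claim_equal_ratePassword : Prop := ∀ (passwod : String), Dom_ratePassword passwod → Spec_ratePassword passwod (ratePassword passwod)

-- ===== LEMMAS AND PROOFS =====
lemma ratePassword_fold_eq (l : List Char) (s : Int) :
    l.foldl
      (fun score c =>
        let asciiDecValue := c.toNat
        if 97 ≤ asciiDecValue ∧ asciiDecValue ≤ 122 then score + 1
        else if 48 ≤ asciiDecValue ∧ asciiDecValue ≤ 57 then score + 2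
        else score + 3) s
    = s + 3 * (l.length : Int)
        - 2 * ((l.filter (fun c => decide (97 ≤ c.toNat ∧ c.toNat ≤ 122))).length : Int)
        - ((l.filter (fun c => decide (48 ≤ c.toNat ∧ c.toNat ≤ 57))).length : Int) := by
  induction l generalizing s with
  | nil => simp
  | cons c t ih =>
    simp only [List.foldl_cons, List.length_cons, List.filter_cons, ih]
    by_cases h1 : 97 ≤ c.toNat ∧ c.toNat ≤ 122
    · have h2 : ¬ (48 ≤ c.toNat ∧ c.toNat ≤ 57) := by omega
      simp [h1, h2]; push_cast; ring
    · by_cases h2 : 48 ≤ c.toNat ∧ c.toNat ≤ 57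
      · simp [h1, h2]; push_cast; ring
      · simp [h1, h2]; push_cast; ring

-- ===== VERDICT (by name: the statement is the Claim_ definition above) =====
theorem ratePassword_spec : Claim_equal_ratePassword := by
  intro p _
  show ratePassword p = ratePassword_alt p
  simp only [ratePassword, ratePassword_alt, ratePassword_fold_eq]
  ring
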